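-- pv_equiv track=rewrite | github.com/manuelgilvargas/EstructurasManuelGil | TAREA1GITHUB.py | sumarValoresMatriz
-- ===== SOURCE A (Python) =====
-- def sumarValoresMatriz(matrizDisp, listaParejas):
--   Acumulado = 0
--   for i in listaParejas:
--     clave = i[0]
--     ubicacion = i[1]
--     if clave in matrizDisp:
--       estructura = matrizDisp[clave]
--       for j in estructura:
--         if j[0] == ubicacion:
--           Acumulado += j[1]
--     else:
--       Acumulado += 0
--   return Acumulado
-- ===== SOURCE B (Python) =====
-- def sumarValoresMatriz(matrizDisp, listaParejas):
--     # count multiplicities of requested (clave, ubicacion) pairs, then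
--     # sweep the matrix once, weighting each entry by its request count
--     count = {}
--     for p in listaParejas:
--         key = (p[0], p[1])
--         count[key] = count.get(key, 0) + 1
--     total = 0
--     for clave, estructura in matrizDisp.items():
--         for loc, val in estructura:
--             total += val * count.get((clave, loc), 0)
--     return total
-- ===== Notes on version B (the rewrite author's own statement) =====
-- stated objective: alternative
-- what changed: B builds a multiplicity table of the requested (clave, ubicacion) pairs once and then sweeps the matrix entries a single time, weighting each value by its request count, instead of rescanning the key's structure for every request pair.
import Mathlib
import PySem

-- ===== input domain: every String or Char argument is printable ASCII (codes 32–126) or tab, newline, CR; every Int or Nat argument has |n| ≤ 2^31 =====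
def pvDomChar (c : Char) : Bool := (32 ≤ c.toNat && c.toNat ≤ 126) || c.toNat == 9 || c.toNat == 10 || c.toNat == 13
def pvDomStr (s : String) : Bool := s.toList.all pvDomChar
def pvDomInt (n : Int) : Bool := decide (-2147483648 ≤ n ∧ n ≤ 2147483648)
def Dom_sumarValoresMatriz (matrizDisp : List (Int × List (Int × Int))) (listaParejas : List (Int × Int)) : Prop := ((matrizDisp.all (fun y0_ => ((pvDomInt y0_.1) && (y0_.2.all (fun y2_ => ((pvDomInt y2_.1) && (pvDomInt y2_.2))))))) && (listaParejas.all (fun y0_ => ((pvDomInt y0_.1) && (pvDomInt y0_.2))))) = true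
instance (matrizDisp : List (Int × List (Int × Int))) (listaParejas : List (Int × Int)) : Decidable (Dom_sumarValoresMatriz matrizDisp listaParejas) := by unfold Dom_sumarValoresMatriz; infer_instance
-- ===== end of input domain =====

-- B replaces A's per-pair rescans of the structure by one request-count table and a single sweep of the matrix entries (alternative decomposition).


-- ===== PORT A =====
def sumarValoresMatriz (matrizDisp : List (Int × List (Int × Int))) (listaParejas : List (Int × Int)) : Int :=
  listaParejas.foldl (fun acumulado i =>
    let clave := i.1
    let ubicacion := i.2
    match (PySem.Dict.mk matrizDisp).get? clave with   -- 'clave in matrizDisp' + 'matrizDisp[clave]'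
    | some estructura =>
        estructura.foldl (fun a j => if j.1 == ubicacion then a + j.2 else a) acumulado
    | none => acumulado + 0) 0

-- ===== PORT B =====
def sumarValoresMatriz_alt (matrizDisp : List (Int × List (Int × Int))) (listaParejas : List (Int × Int)) : Int :=
  let count : PySem.Dict (Int × Int) Int :=
    listaParejas.foldl (fun d p => d.insert p (d.getD p 0 + 1)) PySem.Dict.empty
  matrizDisp.foldl (fun total ke =>
    ke.2.foldl (fun t lv => t + lv.2 * count.getD (ke.1, lv.1) 0) total) 0

-- ===== PRECONDITION & SPEC =====
-- matrizDisp is a Python dict, so its keys are distinct; Pre_ states exactly that shape on the association list.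
def Pre_sumarValoresMatriz (matrizDisp : List (Int × List (Int × Int))) (listaParejas : List (Int × Int)) : Prop :=
  (matrizDisp.map Prod.fst).Nodup
instance (matrizDisp : List (Int × List (Int × Int))) (listaParejas : List (Int × Int)) : Decidable (Pre_sumarValoresMatriz matrizDisp listaParejas) := by unfold Pre_sumarValoresMatriz; infer_instance
def pvWitness_sumarValoresMatriz : (List (Int × List (Int × Int))) × (List (Int × Int)) :=
  ([(1, [(0, 5), (2, 7)]), (2, [(0, 3)])], [(1, 2), (1, 2), (3, 0)])
def Spec_sumarValoresMatriz (matrizDisp : List (Int × List (Int × Int))) (listaParejas : List (Int × Int)) (out : Int) : Prop := out = sumarValoresMatriz_alt matrizDisp listaParejas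
instance (matrizDisp : List (Int × List (Int × Int))) (listaParejas : List (Int × Int)) (out : Int) : Decidable (Spec_sumarValoresMatriz matrizDisp listaParejas out) := by unfold Spec_sumarValoresMatriz; infer_instance

-- ===== CLAIM (what is proved, stated in full; the proofs are below) =====
def Claim_equal_sumarValoresMatriz : Prop := ∀ (matrizDisp : List (Int × List (Int × Int))) (listaParejas : List (Int × Int)), Dom_sumarValoresMatriz matrizDisp listaParejas → Pre_sumarValoresMatriz matrizDisp listaParejas → Spec_sumarValoresMatriz matrizDisp listaParejas (sumarValoresMatriz matrizDisp listaParejas)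

-- ===== LEMMAS AND PROOFS =====

-- value of key c at requested location u, summed over the structure
def pvS (es : List (Int × Int)) (u : Int) : Int :=
  (es.map (fun j => if j.1 = u then j.2 else 0)).sum

-- A's contribution of one request pair
def pvG (m : List (Int × List (Int × Int))) (p : Int × Int) : Int :=
  match (PySem.Dict.mk m).get? p.1 with
  | some es => pvS es p.2
  | none => 0

-- B's mathematical form: matrix entries weighted by request counts
def pvT (m : List (Int × List (Int × Int))) (ps : List (Int × Int)) : Int :=
  (m.map (fun ke => (ke.2.map (fun lv => lv.2 * (ps.count (ke.1, lv.1) : Int))).sum)).sum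

lemma pvA_inner (es : List (Int × Int)) (u acc : Int) :
    es.foldl (fun a j => if j.1 == u then a + j.2 else a) acc = acc + pvS es u := by
  induction es generalizing acc with
  | nil => simp [pvS]
  | cons j es ih =>
    rw [List.foldl_cons, ih]
    simp only [pvS, List.map_cons, List.sum_cons, beq_iff_eq]
    split_ifs <;> ring

lemma pvA_eq (m : List (Int × List (Int × Int))) (ps : List (Int × Int)) (acc : Int) :
    ps.foldl (fun acumulado i =>
      match (PySem.Dict.mk m).get? i.1 with
      | some estructura =>
          estructura.foldl (fun a j => if j.1 == i.2 then a + j.2 else a) acumulado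
      | none => acumulado + 0) acc = acc + (ps.map (pvG m)).sum := by
  induction ps generalizing acc with
  | nil => simp
  | cons p ps ih =>
    simp only [List.foldl_cons, List.map_cons, List.sum_cons]
    cases h : (PySem.Dict.mk m).get? p.1 with
    | some es =>
      simp only [h]
      rw [ih, pvA_inner]
      simp [pvG, h]
      ring
    | none =>
      simp only [h]
      rw [ih]
      simp [pvG, h]

lemma pvB_inner (count : PySem.Dict (Int × Int) Int) (es : List (Int × Int)) (k t : Int) :
    es.foldl (fun t lv => t + lv.2 * count.getD (k, lv.1) 0) t
      = t + (es.map (fun lv => lv.2 * count.getD (k, lv.1) 0)).sum := by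
  induction es generalizing t with
  | nil => simp
  | cons lv es ih => simp only [List.foldl_cons, List.map_cons, List.sum_cons]; rw [ih]; ring

lemma pvB_eq (m : List (Int × List (Int × Int))) (ps : List (Int × Int)) :
    sumarValoresMatriz_alt m ps = pvT m ps := by
  unfold sumarValoresMatriz_alt pvT
  have hc : ∀ q : Int × Int,
      (ps.foldl (fun d p => d.insert p (d.getD p 0 + 1)) PySem.Dict.empty).getD q 0
        = (ps.count q : Int) := by
    intro q
    rw [PySem.Dict.getD_foldl_insert_add_one]
    simp
  simp only
  have : ∀ (l : List (Int × List (Int × Int))) (t : Int),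
      l.foldl (fun total ke =>
        ke.2.foldl (fun t lv => t + lv.2 *
          (ps.foldl (fun d p => d.insert p (d.getD p 0 + 1)) PySem.Dict.empty).getD (ke.1, lv.1) 0) total) t
        = t + (l.map (fun ke => (ke.2.map (fun lv => lv.2 * (ps.count (ke.1, lv.1) : Int))).sum)).sum := by
    intro l
    induction l with
    | nil => simp
    | cons ke l ih =>
      intro t
      simp only [List.foldl_cons, List.map_cons, List.sum_cons]
      rw [pvB_inner, ih]
      simp only [hc]
      ring
  rw [this]; ring

-- with distinct keys, the per-entry indicator sum over the matrix is A's lookup contribution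
lemma pvInd_eq (m : List (Int × List (Int × Int))) (c u : Int)
    (hnd : (m.map Prod.fst).Nodup) :
    (m.map (fun ke => (ke.2.map (fun lv => if (ke.1, lv.1) = (c, u) then lv.2 else 0)).sum)).sum
      = pvG m (c, u) := by
  induction m with
  | nil => simp [pvG, PySem.Dict.get?]
  | cons ke m ih =>
    obtain ⟨k0, es0⟩ := ke
    simp only [List.map_cons, List.sum_cons, List.nodup_cons] at hnd ⊢
    by_cases h : k0 = c
    · subst h
      have hrest : (m.map (fun ke' => (ke'.2.map (fun lv => if (ke'.1, lv.1) = (k0, u) then lv.2 else 0)).sum)).sum = 0 := by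
        apply List.sum_eq_zero
        intro x hx
        simp only [List.mem_map] at hx
        obtain ⟨ke', hke', rfl⟩ := hx
        apply List.sum_eq_zero
        intro y hy
        simp only [List.mem_map] at hy
        obtain ⟨lv, _, rfl⟩ := hy
        have : ke'.1 ≠ k0 := fun he => hnd.1 (he ▸ List.mem_map_of_mem hke')
        simp [Prod.ext_iff, this]
      rw [hrest]
      simp only [pvG, PySem.Dict.get?_mk_cons, beq_self_eq_true, if_true]
      simp [pvS, Prod.ext_iff]
    · have hhead : (es0.map (fun lv => if ((k0, es0).1, lv.1) = (c, u) then lv.2 else 0)).sum = 0 := by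
        apply List.sum_eq_zero
        intro y hy
        simp only [List.mem_map] at hy
        obtain ⟨lv, _, rfl⟩ := hy
        simp [Prod.ext_iff, h]
      rw [hhead, ih hnd.2]
      have hb : (k0 == c) = false := by simp [h]
      simp only [pvG, PySem.Dict.get?_mk_cons, hb]
      simp

lemma pvT_cons (m : List (Int × List (Int × Int))) (p : Int × Int) (ps : List (Int × Int))
    (hnd : (m.map Prod.fst).Nodup) :
    pvT m (p :: ps) = pvG m p + pvT m ps := by
  unfold pvT
  rw [← pvInd_eq m p.1 p.2 hnd, ← List.sum_map_add]
  congr 1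
  apply List.map_congr_left
  intro ke _
  rw [← List.sum_map_add]
  congr 1
  apply List.map_congr_left
  intro lv _
  rw [List.count_cons]
  push_cast
  by_cases h : (ke.1, lv.1) = p
  · simp [h]; ring
  · have h2 : ¬ ((ke.1, lv.1) = (p.1, p.2)) := by simpa using h
    have h3 : ¬ p = (ke.1, lv.1) := fun he => h he.symm
    simp [h2, h3]

lemma pvT_eq_sum (m : List (Int × List (Int × Int))) (ps : List (Int × Int))
    (hnd : (m.map Prod.fst).Nodup) :
    pvT m ps = (ps.map (pvG m)).sum := by
  induction ps with
  | nil =>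
    unfold pvT
    apply List.sum_eq_zero
    intro x hx
    simp only [List.mem_map] at hx
    obtain ⟨ke, _, rfl⟩ := hx
    simp
  | cons p ps ih => rw [pvT_cons m p ps hnd, ih]; simp

-- ===== VERDICT (by name: the statement is the Claim_ definition above) =====
theorem sumarValoresMatriz_spec : Claim_equal_sumarValoresMatriz := by
  intro m ps _ hpre
  show sumarValoresMatriz m ps = sumarValoresMatriz_alt m ps
  rw [pvB_eq, pvT_eq_sum m ps hpre]
  unfold sumarValoresMatriz
  rw [pvA_eq]
  ring
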